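-- pv_equiv track=rewrite | github.com/deadlylover/umamusume-auto-train | utils/constants.py | extract_unique_letters
-- ===== SOURCE A (Python) =====
-- def extract_unique_letters(array):
--   upper = set()
--   lower = set()
--   other = set()
--
--   for s in array:
--     for c in s:
--       if c.isupper():
--         upper.add(c)
--       elif c.islower():
--         lower.add(c)
--       else:
--         other.add(c)
--
--   return (
--     "".join(sorted(lower)) +
--     "".join(sorted(upper)) +
--     "".join(sorted(other, reverse=True))
--   )
-- ===== SOURCE B (Python) =====
-- def extract_unique_letters(array):
--   # mark which ASCII codes occur, then emit by scanning the code table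
--   seen = [False] * 128
--   for s in array:
--     for c in s:
--       seen[ord(c)] = True
--   parts = []
--   for i in range(97, 123):        # 'a'..'z' ascending
--     if seen[i]:
--       parts.append(chr(i))
--   for i in range(65, 91):         # 'A'..'Z' ascending
--     if seen[i]:
--       parts.append(chr(i))
--   for i in range(127, -1, -1):    # everything else, descending
--     if seen[i] and not (97 <= i <= 122) and not (65 <= i <= 90):
--       parts.append(chr(i))
--   return "".join(parts)
-- ===== Notes on version B (the rewrite author's own statement) =====
-- stated objective: alternative
-- what changed: B replaces the three hash-sets plus three comparison sorts by a 128-entry boolean presence table: one marking pass over the input, then the output is emitted by scanning ASCII codes in the required order (lowercase codes ascending, uppercase codes ascending, remaining codes descending) - a counting-sort-style table scan with no set and no sort.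
import Mathlib
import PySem

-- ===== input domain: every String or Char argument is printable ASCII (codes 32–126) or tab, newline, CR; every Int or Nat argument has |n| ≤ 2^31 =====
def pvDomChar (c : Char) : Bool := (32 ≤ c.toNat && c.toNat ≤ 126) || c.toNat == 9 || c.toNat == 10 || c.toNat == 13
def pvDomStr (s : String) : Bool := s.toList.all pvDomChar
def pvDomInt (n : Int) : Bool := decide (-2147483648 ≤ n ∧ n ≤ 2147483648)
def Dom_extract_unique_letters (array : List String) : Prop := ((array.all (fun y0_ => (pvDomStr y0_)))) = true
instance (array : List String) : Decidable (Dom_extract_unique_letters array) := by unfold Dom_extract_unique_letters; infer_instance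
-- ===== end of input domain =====

-- B replaces the three hash-sets plus three comparison sorts by a 128-entry boolean
-- presence table: one marking pass, then the output is read off by scanning ASCII codes
-- in the required order (counting-sort-style; objective: alternative).

-- ===== PORT A =====
def extract_unique_letters (array : List String) : String :=
  let st := array.foldl
    (fun (st : PySem.Set Char × PySem.Set Char × PySem.Set Char) s =>
      s.toList.foldl
        (fun (st : PySem.Set Char × PySem.Set Char × PySem.Set Char) c =>
          if PySem.Chars.isupper c then (PySem.Set.add st.1 c, st.2.1, st.2.2)
          else if PySem.Chars.islower c then (st.1, PySem.Set.add st.2.1 c, st.2.2)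
          else (st.1, st.2.1, PySem.Set.add st.2.2 c))
        st)
    (PySem.Set.empty, PySem.Set.empty, PySem.Set.empty)
  String.ofList (PySem.List.sorted st.2.1 (fun c => c) false
    ++ PySem.List.sorted st.1 (fun c => c) false
    ++ PySem.List.sorted st.2.2 (fun c => c) true)

-- ===== PORT B =====
-- seen[ord(c)] = True: pySetD is Python's list assignment (in range on the ASCII domain)
def extract_unique_letters_alt (array : List String) : String :=
  let seen := array.foldl
    (fun (seen : List Bool) s =>
      s.toList.foldl (fun seen c => PySem.List.pySetD seen (c.toNat : Int) true) seen)
    (List.replicate 128 false)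
  let parts := (PySem.List.pyRange 97 123 1).foldl
    (fun (parts : List Char) i =>
      if PySem.List.pyGetD seen i false then parts ++ [Char.ofNat i.toNat] else parts) []
  let parts := (PySem.List.pyRange 65 91 1).foldl
    (fun (parts : List Char) i =>
      if PySem.List.pyGetD seen i false then parts ++ [Char.ofNat i.toNat] else parts) parts
  let parts := (PySem.List.pyRange 127 (-1) (-1)).foldl
    (fun (parts : List Char) i =>
      if PySem.List.pyGetD seen i false && !(decide (97 ≤ i) && decide (i ≤ 122))
          && !(decide (65 ≤ i) && decide (i ≤ 90)) then parts ++ [Char.ofNat i.toNat]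
      else parts) parts
  String.ofList parts

-- ===== PRECONDITION & SPEC =====
def Spec_extract_unique_letters (array : List String) (out : String) : Prop := out = extract_unique_letters_alt array
instance (array : List String) (out : String) : Decidable (Spec_extract_unique_letters array out) := by unfold Spec_extract_unique_letters; infer_instance

-- ===== CLAIM (what is proved, stated in full; the proofs are below) =====
def Claim_equal_extract_unique_letters : Prop := ∀ (array : List String), Dom_extract_unique_letters array → Spec_extract_unique_letters array (extract_unique_letters array)

-- ===== LEMMAS AND PROOFS =====

-- basic Char facts
theorem pv_toNat_ofNat (n : Nat) (h : n < 128) : (Char.ofNat n).toNat = n := by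
  unfold Char.ofNat
  rw [dif_pos (by simp [Nat.isValidChar]; omega)]
  show (UInt32.ofNatLT n _).toNat = n
  simp [UInt32.toNat_ofNatLT]

theorem pv_char_eq_iff (c d : Char) : c = d ↔ c.toNat = d.toNat :=
  ⟨fun h => by rw [h], fun h => Char.ext (UInt32.toNat_inj.mp h)⟩

theorem pv_char_lt_iff (c d : Char) : c < d ↔ c.toNat < d.toNat := by
  simp [Char.lt_def, UInt32.lt_iff_toNat_lt]

theorem pv_islower_iff (c : Char) : PySem.Chars.islower c = true ↔ 97 ≤ c.toNat ∧ c.toNat ≤ 122 := by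
  simp [PySem.Chars.islower, Char.le_def, UInt32.le_iff_toNat_le]

theorem pv_isupper_iff (c : Char) : PySem.Chars.isupper c = true ↔ 65 ≤ c.toNat ∧ c.toNat ≤ 90 := by
  simp [PySem.Chars.isupper, Char.le_def, UInt32.le_iff_toNat_le]

theorem pv_dom_codes (array : List String) (h : Dom_extract_unique_letters array) :
    ∀ c ∈ array.flatMap String.toList, c.toNat < 128 := by
  intro c hc
  rw [List.mem_flatMap] at hc
  obtain ⟨s, hs, hcs⟩ := hc
  unfold Dom_extract_unique_letters at h
  rw [List.all_eq_true] at h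
  have := h s hs
  simp only [pvDomStr, List.all_eq_true] at this
  have := this c hcs
  simp [pvDomChar] at this
  omega

-- ===== A-side: the three sets are filters of the flattened char stream =====
theorem pv_lower_band (c : Char) :
    (!PySem.Chars.isupper c && PySem.Chars.islower c) = PySem.Chars.islower c := by
  by_cases h : PySem.Chars.islower c = true <;>
    simp_all [PySem.Chars.isupper, PySem.Chars.islower, Char.le_def, UInt32.le_iff_toNat_le]
  omega

def pvStep (st : PySem.Set Char × PySem.Set Char × PySem.Set Char) (c : Char) :
    PySem.Set Char × PySem.Set Char × PySem.Set Char :=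
  if PySem.Chars.isupper c then (PySem.Set.add st.1 c, st.2.1, st.2.2)
  else if PySem.Chars.islower c then (st.1, PySem.Set.add st.2.1 c, st.2.2)
  else (st.1, st.2.1, PySem.Set.add st.2.2 c)

theorem pv_fold_comp (cs : List Char) (st : PySem.Set Char × PySem.Set Char × PySem.Set Char) :
    cs.foldl pvStep st =
      ((cs.filter (fun c => PySem.Chars.isupper c)).foldl PySem.Set.add st.1,
       (cs.filter (fun c => !PySem.Chars.isupper c && PySem.Chars.islower c)).foldl PySem.Set.add st.2.1,
       (cs.filter (fun c => !PySem.Chars.isupper c && !PySem.Chars.islower c)).foldl PySem.Set.add st.2.2) := by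
  induction cs generalizing st with
  | nil => rfl
  | cons c cs ih =>
    by_cases hu : PySem.Chars.isupper c = true
    · simp [List.filter, hu, pvStep, ih]
    · by_cases hl : PySem.Chars.islower c = true <;>
        simp [List.filter, hu, hl, pvStep, ih]

theorem pv_A_eq (array : List String) :
    extract_unique_letters array = String.ofList
      (PySem.List.sorted (PySem.Set.ofList ((array.flatMap String.toList).filter (fun c => PySem.Chars.islower c))) (fun c => c) false
        ++ PySem.List.sorted (PySem.Set.ofList ((array.flatMap String.toList).filter (fun c => PySem.Chars.isupper c))) (fun c => c) false
        ++ PySem.List.sorted (PySem.Set.ofList ((array.flatMap String.toList).filter (fun c => !PySem.Chars.isupper c && !PySem.Chars.islower c))) (fun c => c) true) := by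
  unfold extract_unique_letters
  have hnest : array.foldl
      (fun (st : PySem.Set Char × PySem.Set Char × PySem.Set Char) s =>
        s.toList.foldl
          (fun st c =>
            if PySem.Chars.isupper c then (PySem.Set.add st.1 c, st.2.1, st.2.2)
            else if PySem.Chars.islower c then (st.1, PySem.Set.add st.2.1 c, st.2.2)
            else (st.1, st.2.1, PySem.Set.add st.2.2 c)) st)
      (PySem.Set.empty, PySem.Set.empty, PySem.Set.empty)
      = (array.flatMap String.toList).foldl pvStep (PySem.Set.empty, PySem.Set.empty, PySem.Set.empty) := by
    have : array.flatMap String.toList = (array.map String.toList).flatten := by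
      simp [List.flatMap]
    rw [this, List.foldl_flatten, List.foldl_map]
    rfl
  rw [hnest, pv_fold_comp]
  have hofl : ∀ (p : Char → Bool),
      ((array.flatMap String.toList).filter p).foldl PySem.Set.add (PySem.Set.empty : PySem.Set Char)
        = PySem.Set.ofList ((array.flatMap String.toList).filter p) := by
    intro p; rw [PySem.Set.ofList_eq_foldl]; rfl
  simp only [hofl]
  have hlow : (array.flatMap String.toList).filter
      (fun c => !PySem.Chars.isupper c && PySem.Chars.islower c)
      = (array.flatMap String.toList).filter (fun c => PySem.Chars.islower c) := by
    exact List.filter_congr (fun c _ => pv_lower_band c)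
  rw [hlow]

-- ===== B-side: the presence table =====
theorem pv_seen_getD (cs : List Char) (seen0 : List Bool) (h : seen0.length = 128)
    (hcs : ∀ c ∈ cs, c.toNat < 128) (k : Nat) :
    PySem.List.pyGetD (cs.foldl (fun seen c => PySem.List.pySetD seen (c.toNat : Int) true) seen0) (k : Int) false
      = (cs.any (fun c => c.toNat == k) || PySem.List.pyGetD seen0 (k : Int) false) := by
  induction cs generalizing seen0 with
  | nil => simp
  | cons c cs ih =>
    have hc : c.toNat < 128 := hcs c (List.mem_cons_self)
    have hlen : (PySem.List.pySetD seen0 (c.toNat : Int) true).length = 128 := by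
      rw [PySem.List.length_pySetD, h]
    rw [List.foldl_cons, ih _ hlen (fun c' hc' => hcs c' (List.mem_cons_of_mem _ hc'))]
    rw [PySem.List.pyGetD_pySetD_natCast seen0 c.toNat k true false (by omega)]
    by_cases hkc : c.toNat = k
    · simp [hkc]
    · rw [if_neg (fun h => hkc h.symm)]
      have h2 : (c.toNat == k) = false := beq_eq_false_iff_ne.mpr hkc
      simp [h2]

theorem pv_seen_spec (array : List String) (h : Dom_extract_unique_letters array) :
    ∀ i : Int, 0 ≤ i → i < 128 →
      PySem.List.pyGetD
        (array.foldl
          (fun (seen : List Bool) s =>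
            s.toList.foldl (fun seen c => PySem.List.pySetD seen (c.toNat : Int) true) seen)
          (List.replicate 128 false)) i false
      = (array.flatMap String.toList).any (fun c => ((c.toNat : Int) == i)) := by
  intro i hi0 hi128
  have hnest : array.foldl
      (fun (seen : List Bool) s =>
        s.toList.foldl (fun seen c => PySem.List.pySetD seen (c.toNat : Int) true) seen)
      (List.replicate 128 false)
      = (array.flatMap String.toList).foldl
          (fun seen c => PySem.List.pySetD seen (c.toNat : Int) true) (List.replicate 128 false) := by
    have : array.flatMap String.toList = (array.map String.toList).flatten := by
      simp [List.flatMap]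
    rw [this, List.foldl_flatten, List.foldl_map]
  obtain ⟨k, rfl⟩ : ∃ k : Nat, i = (k : Int) := ⟨i.toNat, by omega⟩
  rw [hnest, pv_seen_getD _ _ (by simp) (pv_dom_codes array h) k]
  rw [PySem.List.pyGetD_natCast]
  have h0 : (List.replicate 128 (false : Bool)).getD k false = false := by
    rw [List.getD_eq_getElem?_getD, List.getElem?_replicate]
    split <;> rfl
  rw [h0, Bool.or_false]
  exact List.any_congr rfl (fun c => by simp)

-- replace the table lookup by the occurrence predicate inside a filter over a code range
theorem pv_filter_bounds_congr (a b : Int) (f g : Int → Bool)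
    (ha : 0 ≤ a) (hb : b ≤ 128)
    (hfg : ∀ i : Int, 0 ≤ i → i < 128 → f i = g i) :
    (PySem.List.pyRange a b 1).filter f = (PySem.List.pyRange a b 1).filter g := by
  apply List.filter_congr
  intro i hi
  rw [PySem.List.mem_pyRange_one] at hi
  rw [hfg i (by omega) (by omega)]

-- the ordered emission: filtered code range mapped to chars
theorem pv_mem_map_range (a b : Int) (p : Int → Bool) (ha : 0 ≤ a) (hb : b ≤ 128) (c : Char) :
    c ∈ ((PySem.List.pyRange a b 1).filter p).map (fun i => Char.ofNat i.toNat)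
      ↔ a ≤ (c.toNat : Int) ∧ (c.toNat : Int) < b ∧ p (c.toNat : Int) = true := by
  simp only [List.mem_map, List.mem_filter, PySem.List.mem_pyRange_one]
  constructor
  · rintro ⟨i, ⟨⟨hai, hib⟩, hpi⟩, rfl⟩
    have hi0 : 0 ≤ i := le_trans ha hai
    have hi128 : i < 128 := lt_of_lt_of_le hib hb
    have htn : ((Char.ofNat i.toNat).toNat : Int) = i := by
      rw [pv_toNat_ofNat _ (by omega)]; omega
    rw [htn]; exact ⟨hai, hib, hpi⟩
  · rintro ⟨hac, hcb, hpc⟩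
    refine ⟨(c.toNat : Int), ⟨⟨hac, hcb⟩, hpc⟩, ?_⟩
    rw [pv_char_eq_iff, pv_toNat_ofNat]
    · simp
    · omega

theorem pv_pairwise_map_range (a b : Int) (p : Int → Bool) (ha : 0 ≤ a) (hb : b ≤ 128) :
    (((PySem.List.pyRange a b 1).filter p).map (fun i => Char.ofNat i.toNat)).Pairwise (· < ·) := by
  rw [List.pairwise_map]
  refine List.Pairwise.imp_of_mem ?_ ((PySem.List.pairwise_lt_pyRange_one a b).filter p)
  intro i j hi hj hij
  have hi' := (List.mem_filter.mp hi).1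
  have hj' := (List.mem_filter.mp hj).1
  rw [PySem.List.mem_pyRange_one] at hi' hj'
  rw [pv_char_lt_iff, pv_toNat_ofNat _ (by omega), pv_toNat_ofNat _ (by omega)]
  omega

theorem pv_nodup_map_range (a b : Int) (p : Int → Bool) (ha : 0 ≤ a) (hb : b ≤ 128) :
    (((PySem.List.pyRange a b 1).filter p).map (fun i => Char.ofNat i.toNat)).Nodup := by
  refine List.Nodup.map_on ?_ ((PySem.List.nodup_pyRange_one a b).filter p)
  intro i hi j hj hij
  have hi' := (List.mem_filter.mp hi).1
  have hj' := (List.mem_filter.mp hj).1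
  rw [PySem.List.mem_pyRange_one] at hi' hj'
  rw [pv_char_eq_iff, pv_toNat_ofNat _ (by omega), pv_toNat_ofNat _ (by omega)] at hij
  omega

-- the presence predicate holds at c's own code iff c occurs in the stream
theorem pv_any_self (cs : List Char) (c : Char) :
    cs.any (fun c' => (c'.toNat : Int) == (c.toNat : Int)) = true ↔ c ∈ cs := by
  simp only [List.any_eq_true, beq_iff_eq]
  constructor
  · rintro ⟨c', hc', h⟩
    have : c' = c := by rw [pv_char_eq_iff]; omega
    exact this ▸ hc'
  · intro hc; exact ⟨c, hc, rfl⟩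

-- ascending scan over the lowercase code band = sorted of the lowercase class
theorem pv_lower_eq (array : List String) :
    PySem.List.sorted (PySem.Set.ofList ((array.flatMap String.toList).filter (fun c => PySem.Chars.islower c))) (fun c => c) false
      = ((PySem.List.pyRange 97 123 1).filter
            (fun i => (array.flatMap String.toList).any (fun c => (c.toNat : Int) == i))).map
          (fun i => Char.ofNat i.toNat) := by
  apply PySem.List.sorted_eq_of_perm_of_pairwise_lt
  · rw [List.perm_ext_iff_of_nodup (pv_nodup_map_range _ _ _ (by norm_num) (by norm_num))
      (PySem.Set.nodup_ofList _)]
    intro c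
    rw [pv_mem_map_range _ _ _ (by norm_num) (by norm_num), PySem.Set.mem_ofList, List.mem_filter,
      pv_any_self, pv_islower_iff]
    constructor
    · rintro ⟨h1, h2, h3⟩; exact ⟨h3, by omega, by omega⟩
    · rintro ⟨h1, h2, h3⟩; exact ⟨by omega, by omega, h1⟩
  · exact pv_pairwise_map_range _ _ _ (by norm_num) (by norm_num)

-- ascending scan over the uppercase code band = sorted of the uppercase class
theorem pv_upper_eq (array : List String) :
    PySem.List.sorted (PySem.Set.ofList ((array.flatMap String.toList).filter (fun c => PySem.Chars.isupper c))) (fun c => c) false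
      = ((PySem.List.pyRange 65 91 1).filter
            (fun i => (array.flatMap String.toList).any (fun c => (c.toNat : Int) == i))).map
          (fun i => Char.ofNat i.toNat) := by
  apply PySem.List.sorted_eq_of_perm_of_pairwise_lt
  · rw [List.perm_ext_iff_of_nodup (pv_nodup_map_range _ _ _ (by norm_num) (by norm_num))
      (PySem.Set.nodup_ofList _)]
    intro c
    rw [pv_mem_map_range _ _ _ (by norm_num) (by norm_num), PySem.Set.mem_ofList, List.mem_filter,
      pv_any_self, pv_isupper_iff]
    constructor
    · rintro ⟨h1, h2, h3⟩; exact ⟨h3, by omega, by omega⟩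
    · rintro ⟨h1, h2, h3⟩; exact ⟨by omega, by omega, h1⟩
  · exact pv_pairwise_map_range _ _ _ (by norm_num) (by norm_num)

-- descending scan over all codes with the letter bands masked = reverse-sorted 'other' class
theorem pv_other_eq (array : List String) (hdom : Dom_extract_unique_letters array) :
    PySem.List.sorted (PySem.Set.ofList ((array.flatMap String.toList).filter (fun c => !PySem.Chars.isupper c && !PySem.Chars.islower c))) (fun c => c) true
      = (((PySem.List.pyRange 0 128 1).filter
            (fun i => ((array.flatMap String.toList).any (fun c => (c.toNat : Int) == i))
              && !(decide (97 ≤ i) && decide (i ≤ 122)) && !(decide (65 ≤ i) && decide (i ≤ 90)))).map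
          (fun i => Char.ofNat i.toNat)).reverse := by
  apply PySem.List.sorted_rev_eq_of_perm_of_pairwise_gt
  · rw [List.perm_ext_iff_of_nodup
      (List.nodup_reverse.mpr (pv_nodup_map_range 0 128 _ (by norm_num) (by norm_num)))
      (PySem.Set.nodup_ofList _)]
    intro c
    rw [List.mem_reverse, pv_mem_map_range _ _ _ (by norm_num) (by norm_num),
      PySem.Set.mem_ofList, List.mem_filter]
    constructor
    · rintro ⟨h0, h128, hcond⟩
      simp only [Bool.and_eq_true, Bool.not_eq_true'] at hcond
      obtain ⟨⟨hany, hl⟩, hu⟩ := hcond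
      rw [pv_any_self] at hany
      refine ⟨hany, ?_⟩
      simp only [Bool.and_eq_true, Bool.not_eq_true']
      constructor
      · rw [Bool.eq_false_iff]
        intro hup; rw [pv_isupper_iff] at hup
        simp only [Bool.and_eq_false_iff, decide_eq_false_iff_not, not_le] at hu
        omega
      · rw [Bool.eq_false_iff]
        intro hlo; rw [pv_islower_iff] at hlo
        simp only [Bool.and_eq_false_iff, decide_eq_false_iff_not, not_le] at hl
        omega
    · rintro ⟨hmem, hcls⟩
      simp only [Bool.and_eq_true, Bool.not_eq_true'] at hcls
      obtain ⟨hu, hl⟩ := hcls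
      have hcode := pv_dom_codes array hdom c hmem
      refine ⟨by omega, by omega, ?_⟩
      simp only [Bool.and_eq_true, Bool.not_eq_true']
      refine ⟨⟨(pv_any_self _ _).mpr hmem, ?_⟩, ?_⟩
      · rw [Bool.eq_false_iff] at hl ⊢
        intro h
        simp only [Bool.and_eq_true, decide_eq_true_eq] at h
        exact hl (by rw [pv_islower_iff]; omega)
      · rw [Bool.eq_false_iff] at hu ⊢
        intro h
        simp only [Bool.and_eq_true, decide_eq_true_eq] at h
        exact hu (by rw [pv_isupper_iff]; omega)
  · rw [List.pairwise_reverse]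
    exact pv_pairwise_map_range 0 128 _ (by norm_num) (by norm_num)

-- ===== VERDICT (by name: the statement is the Claim_ definition above) =====
theorem extract_unique_letters_spec : Claim_equal_extract_unique_letters := by
  intro array hdom
  show extract_unique_letters array = extract_unique_letters_alt array
  rw [pv_A_eq]
  simp only [extract_unique_letters_alt]
  rw [PySem.List.foldl_append_if, PySem.List.foldl_append_if, PySem.List.foldl_append_if]
  rw [PySem.List.pyRange_neg_one_eq_reverse,
    show ((-1 : Int) + 1) = 0 from by norm_num, show ((127 : Int) + 1) = 128 from by norm_num]
  rw [List.filter_reverse, List.map_reverse]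
  rw [pv_filter_bounds_congr 97 123 _
        (fun i => (array.flatMap String.toList).any (fun c => (c.toNat : Int) == i))
        (by norm_num) (by norm_num)
        (fun i h1 h2 => pv_seen_spec array hdom i h1 h2),
      pv_filter_bounds_congr 65 91 _
        (fun i => (array.flatMap String.toList).any (fun c => (c.toNat : Int) == i))
        (by norm_num) (by norm_num)
        (fun i h1 h2 => pv_seen_spec array hdom i h1 h2),
      pv_filter_bounds_congr 0 128 _
        (fun i => ((array.flatMap String.toList).any (fun c => (c.toNat : Int) == i))
          && !(decide (97 ≤ i) && decide (i ≤ 122)) && !(decide (65 ≤ i) && decide (i ≤ 90)))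
        (by norm_num) (by norm_num)
        (fun i h1 h2 => by rw [pv_seen_spec array hdom i h1 h2])]
  rw [← pv_lower_eq array, ← pv_upper_eq array, ← pv_other_eq array hdom]
  simp [List.append_assoc]
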